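-- pv_equiv track=rewrite | github.com/Matt-Hayter/Tech-Learning | python/coding_questions/topics/strings/count_common_divisors.py | solution
-- ===== SOURCE A (Python) =====
-- def solution(a, b):
--   count = 0
--   for i in range(1, min(len(a), len(b)) + 1):
--       if a[:i] != b[:i]: # If prefixes match
--         break
--       if a[:i] * (len(a)//i) == a and b[:i] * (len(b)//i) == b: # If both strings are divisible by prefix
--         count += 1
--   return count
-- ===== SOURCE B (Python) =====
-- def solution(a, b):
--     la, lb = len(a), len(b)
--     # Euclid's algorithm: any common divisor-prefix length must divide gcd(la, lb)
--     x, y = la, lb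
--     while y:
--         x, y = y, x % y
--     g = x
--     count = 0
--     for i in range(1, g + 1):
--         if g % i == 0 and a[:i] == b[:i] and a[:i] * (la // i) == a and b[:i] * (lb // i) == b:
--             count += 1
--     return count
-- ===== Notes on version B (the rewrite author's own statement) =====
-- stated objective: faster
-- what changed: Replaces A's linear scan over every prefix length (each step slicing and rebuilding both strings) by Euclid's algorithm on the two lengths followed by a check of only the divisor lengths of gcd(len(a), len(b)).
import Mathlib
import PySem

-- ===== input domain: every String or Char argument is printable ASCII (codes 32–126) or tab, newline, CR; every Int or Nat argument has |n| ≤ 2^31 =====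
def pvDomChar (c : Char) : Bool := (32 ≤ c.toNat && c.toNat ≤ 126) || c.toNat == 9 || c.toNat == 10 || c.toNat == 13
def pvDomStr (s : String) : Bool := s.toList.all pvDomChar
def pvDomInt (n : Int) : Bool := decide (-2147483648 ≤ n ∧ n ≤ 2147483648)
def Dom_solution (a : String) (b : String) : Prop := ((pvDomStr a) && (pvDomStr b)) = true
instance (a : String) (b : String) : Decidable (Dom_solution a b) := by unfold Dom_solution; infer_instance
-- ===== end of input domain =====

-- B replaces A's linear scan over every prefix length by Euclid's gcd of the two
-- lengths followed by a check of only the divisors of that gcd.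

-- ===== PORT A =====
-- the for-loop with its break, recursing over the range list; count is the accumulator
def pvAgo (l k : List Char) : List Int → Int → Int
  | [], count => count
  | i :: rest, count =>
    if PySem.List.slice l none (some i) ≠ PySem.List.slice k none (some i) then count  -- break
    else
      pvAgo l k rest
        (if PySem.List.pyRepeat (PySem.List.slice l none (some i)) (PySem.Int.floordiv (l.length : Int) i) = l
            ∧ PySem.List.pyRepeat (PySem.List.slice k none (some i)) (PySem.Int.floordiv (k.length : Int) i) = k
         then count + 1 else count)

def solution (a : String) (b : String) : Int :=
  pvAgo a.toList b.toList
    (PySem.List.pyRange 1 (min (PySem.Str.len a) (PySem.Str.len b) + 1) 1) 0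

-- ===== PORT B =====
-- while y: x, y = y, x % y
def pvGcdLoop (x y : Int) : Int :=
  if _h : y = 0 then x else pvGcdLoop y (PySem.Int.mod x y)
  termination_by y.natAbs
  decreasing_by
    rcases lt_trichotomy y 0 with hy | hy | hy
    · have hb := PySem.Int.mod_neg_bounds x hy
      omega
    · exact absurd hy _h
    · have h1 := PySem.Int.mod_nonneg x hy
      have h2 := PySem.Int.mod_lt x hy
      omega

def solution_alt (a : String) (b : String) : Int :=
  let l := a.toList
  let k := b.toList
  let g := pvGcdLoop (l.length : Int) (k.length : Int)
  (PySem.List.pyRange 1 (g + 1) 1).foldl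
    (fun count i =>
      if PySem.Int.mod g i = 0
         ∧ PySem.List.slice l none (some i) = PySem.List.slice k none (some i)
         ∧ PySem.List.pyRepeat (PySem.List.slice l none (some i)) (PySem.Int.floordiv (l.length : Int) i) = l
         ∧ PySem.List.pyRepeat (PySem.List.slice k none (some i)) (PySem.Int.floordiv (k.length : Int) i) = k
       then count + 1 else count) 0

-- ===== PRECONDITION & SPEC =====
def Spec_solution (a : String) (b : String) (out : Int) : Prop := out = solution_alt a b
instance (a : String) (b : String) (out : Int) : Decidable (Spec_solution a b out) := by unfold Spec_solution; infer_instance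

-- ===== CLAIM (what is proved, stated in full; the proofs are below) =====
def Claim_equal_solution : Prop := ∀ (a : String) (b : String), Dom_solution a b → Spec_solution a b (solution a b)

-- ===== LEMMAS AND PROOFS =====

-- the common per-length condition, on the Nat side
def pvP (l k : List Char) (n : Nat) : Bool :=
  (l.take n == k.take n)
    && ((List.replicate (l.length / n) (l.take n)).flatten == l)
    && ((List.replicate (k.length / n) (k.take n)).flatten == k)

theorem pvTake_mono {l k : List Char} {n j : Nat} (h : l.take n = k.take n) (hj : j ≤ n) :
    l.take j = k.take j := by
  have : l.take j = (l.take n).take j := by rw [List.take_take, Nat.min_eq_left hj]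
  rw [this, h, List.take_take, Nat.min_eq_left hj]

theorem pvRep_dvd {l : List Char} {n : Nat} (_h1 : 1 ≤ n) (h2 : n ≤ l.length)
    (h : (List.replicate (l.length / n) (l.take n)).flatten = l) : n ∣ l.length := by
  have hlen := congrArg List.length h
  simp [List.length_flatten, List.length_take, Nat.min_eq_left h2, Nat.mul_comm] at hlen
  exact ⟨l.length / n, hlen.symm⟩

theorem pvP_bounds {l k : List Char} {n : Nat} (hn : 1 ≤ n) (h : pvP l k n = true) :
    (n ≤ l.length ∧ n ≤ k.length) ∨ (l = [] ∧ k = []) := by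
  simp only [pvP, Bool.and_eq_true, beq_iff_eq] at h
  obtain ⟨⟨hpre, hrl⟩, hrk⟩ := h
  by_cases hl : l = []
  · right
    refine ⟨hl, ?_⟩
    subst hl
    have hk : k.take n = [] := by simpa using hpre.symm
    rcases List.take_eq_nil_iff.mp hk with h0 | h0
    · omega
    · exact h0
  · left
    have hnl : n ≤ l.length := by
      by_contra hgt
      have h0 : l.length / n = 0 := Nat.div_eq_of_lt (by omega)
      rw [h0] at hrl
      simp at hrl
      exact hl hrl
    refine ⟨hnl, ?_⟩
    by_contra hgt
    have h0 : k.length / n = 0 := Nat.div_eq_of_lt (by omega)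
    rw [h0] at hrk
    simp at hrk
    subst hrk
    have hl0 : l.take n = [] := by simpa using hpre
    rcases List.take_eq_nil_iff.mp hl0 with h0 | h0
    · omega
    · exact hl h0

theorem pvP_dvd_gcd {l k : List Char} {n : Nat} (hn : 1 ≤ n) (h : pvP l k n = true) :
    n ∣ Nat.gcd l.length k.length := by
  rcases pvP_bounds hn h with ⟨h1, h2⟩ | ⟨h1, h2⟩
  · simp only [pvP, Bool.and_eq_true, beq_iff_eq] at h
    exact Nat.dvd_gcd (pvRep_dvd hn h1 h.1.2) (pvRep_dvd hn h2 h.2)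
  · subst h1; subst h2; simp

-- the port conditions at i = ↑n are pvP's conjuncts
theorem pvSlice_cast (l : List Char) (n : Nat) :
    PySem.List.slice l none (some (n : Int)) = l.take n := PySem.List.slice_to_natCast l n

theorem pvRep_cast (l : List Char) (n : Nat) :
    PySem.List.pyRepeat (PySem.List.slice l none (some (n : Int)))
        (PySem.Int.floordiv (l.length : Int) (n : Int))
      = (List.replicate (l.length / n) (l.take n)).flatten := by
  simp only [PySem.List.pyRepeat]
  rw [pvSlice_cast, PySem.Int.floordiv_natCast, Int.toNat_natCast]

-- the loop condition at i = ↑n, as the Nat-side predicate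
theorem pvCond_iff (l k : List Char) (g n : Nat) :
    (PySem.Int.mod (g : Int) (n : Int) = 0
       ∧ PySem.List.slice l none (some (n : Int)) = PySem.List.slice k none (some (n : Int))
       ∧ PySem.List.pyRepeat (PySem.List.slice l none (some (n : Int))) (PySem.Int.floordiv (l.length : Int) (n : Int)) = l
       ∧ PySem.List.pyRepeat (PySem.List.slice k none (some (n : Int))) (PySem.Int.floordiv (k.length : Int) (n : Int)) = k)
    ↔ ((g % n == 0) && pvP l k n) = true := by
  rw [pvRep_cast, pvRep_cast, PySem.Int.mod_natCast, pvSlice_cast, pvSlice_cast]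
  simp [pvP, and_assoc]
  intro _ _ _
  rw [Int.natCast_dvd_natCast]
  exact ⟨fun h => Nat.mod_eq_zero_of_dvd h, fun h => Nat.dvd_of_mod_eq_zero h⟩

-- A's loop counts pvP over [n, m]: the break is harmless because prefix equality is
-- downward closed (pvTake_mono)
theorem pvAgo_count (l k : List Char) (m : Nat) :
    ∀ (d n : Nat) (c : Int), m + 1 - n = d →
      pvAgo l k (PySem.List.pyRange (n : Int) ((m : Int) + 1) 1) c
        = c + ((List.range' n (m + 1 - n)).countP (pvP l k) : Int) := by
  intro d
  induction d with
  | zero =>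
    intro n c hd
    rw [PySem.List.pyRange_one_eq_nil (by omega), hd]
    simp [pvAgo]
  | succ d ih =>
    intro n c hd
    have hnm : n ≤ m := by omega
    rw [PySem.List.pyRange_one_cons (by omega)]
    have hcast : ((n : Int) + 1) = ((n + 1 : Nat) : Int) := by push_cast; ring
    by_cases hpre : List.take n l = List.take n k
    · rw [pvAgo, if_neg (by simp; exact hpre), hcast, ih (n + 1) _ (by omega)]
      have hsucc : m + 1 - n = (m - n) + 1 := by omega
      have hsucc' : m + 1 - (n + 1) = m - n := by omega
      rw [hsucc, List.range'_succ, List.countP_cons, hsucc']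
      have hP : pvP l k n =
          (((List.replicate (l.length / n) (l.take n)).flatten == l)
            && ((List.replicate (k.length / n) (k.take n)).flatten == k)) := by
        simp [pvP, hpre]
      rw [hP, pvRep_cast, pvRep_cast]
      by_cases hrep : (List.replicate (l.length / n) (l.take n)).flatten = l
          ∧ (List.replicate (k.length / n) (k.take n)).flatten = k
      · rw [if_pos hrep]
        simp [hrep.1, hrep.2]
        ring
      · rw [if_neg hrep]
        have hff : (((List.replicate (l.length / n) (l.take n)).flatten == l)
            && ((List.replicate (k.length / n) (k.take n)).flatten == k)) = false := by
          simp only [Bool.and_eq_false_iff, beq_eq_false_iff_ne, ne_eq]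
          tauto
        simp [hff]
    · rw [pvAgo, if_pos (by simp; exact hpre)]
      have hzero : (List.range' n (m + 1 - n)).countP (pvP l k) = 0 := by
        apply List.countP_eq_zero.mpr
        intro j hj
        have hj' : n ≤ j := (List.mem_range'_1.mp hj).1
        cases hpj : pvP l k j with
        | false => simp
        | true =>
          exfalso
          simp only [pvP, Bool.and_eq_true, beq_iff_eq] at hpj
          exact hpre (pvTake_mono hpj.1.1 hj')
      simp [hzero]

theorem pvGcdLoop_eq (x y : Nat) : pvGcdLoop (x : Int) (y : Int) = (Nat.gcd x y : Int) := by
  induction y using Nat.strong_induction_on generalizing x with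
  | _ y ih =>
    rw [pvGcdLoop]
    by_cases hy : (y : Int) = 0
    · have h0 : y = 0 := by exact_mod_cast hy
      subst h0
      simp
    · have hy0 : y ≠ 0 := by exact_mod_cast hy
      rw [dif_neg hy, PySem.Int.mod_natCast,
        ih (x % y) (Nat.mod_lt x (Nat.pos_of_ne_zero hy0)) y]
      congr 1
      rw [Nat.gcd_comm y (x % y), ← Nat.gcd_rec y x, Nat.gcd_comm y x]

-- B's fold counts its condition over [n, g]
theorem pvBgo_count (l k : List Char) (g : Nat) :
    ∀ (d n : Nat) (c : Int), g + 1 - n = d →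
      (PySem.List.pyRange (n : Int) ((g : Int) + 1) 1).foldl
        (fun count i =>
          if PySem.Int.mod (g : Int) i = 0
             ∧ PySem.List.slice l none (some i) = PySem.List.slice k none (some i)
             ∧ PySem.List.pyRepeat (PySem.List.slice l none (some i)) (PySem.Int.floordiv (l.length : Int) i) = l
             ∧ PySem.List.pyRepeat (PySem.List.slice k none (some i)) (PySem.Int.floordiv (k.length : Int) i) = k
           then count + 1 else count) c
      = c + ((List.range' n (g + 1 - n)).countP (fun j => (g % j == 0) && pvP l k j) : Int) := by
  intro d
  induction d with
  | zero =>
    intro n c hd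
    rw [PySem.List.pyRange_one_eq_nil (by omega), hd]
    simp
  | succ d ih =>
    intro n c hd
    have hng : n ≤ g := by omega
    rw [PySem.List.pyRange_one_cons (by omega), List.foldl_cons]
    have hcast : ((n : Int) + 1) = ((n + 1 : Nat) : Int) := by push_cast; ring
    rw [hcast, ih (n + 1) _ (by omega)]
    have hsucc : g + 1 - n = (g - n) + 1 := by omega
    have hsucc' : g + 1 - (n + 1) = g - n := by omega
    rw [hsucc, List.range'_succ, List.countP_cons, hsucc']
    by_cases hcond : PySem.Int.mod (g : Int) (n : Int) = 0
        ∧ PySem.List.slice l none (some (n : Int)) = PySem.List.slice k none (some (n : Int))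
        ∧ PySem.List.pyRepeat (PySem.List.slice l none (some (n : Int))) (PySem.Int.floordiv (l.length : Int) (n : Int)) = l
        ∧ PySem.List.pyRepeat (PySem.List.slice k none (some (n : Int))) (PySem.Int.floordiv (k.length : Int) (n : Int)) = k
    · rw [if_pos hcond]
      have hq : ((g % n == 0) && pvP l k n) = true := (pvCond_iff l k g n).mp hcond
      rw [hq]
      simp
      ring
    · rw [if_neg hcond]
      have hq : ((g % n == 0) && pvP l k n) = false := by
        cases hb : ((g % n == 0) && pvP l k n) with
        | false => rfl
        | true => exact absurd ((pvCond_iff l k g n).mpr hb) hcond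
      rw [hq]
      simp

theorem pvCount_eq (l k : List Char) :
    ((List.range' 1 (min l.length k.length)).countP (pvP l k) : Nat)
      = (List.range' 1 (Nat.gcd l.length k.length)).countP
          (fun n => (Nat.gcd l.length k.length % n == 0) && pvP l k n) := by
  set m := min l.length k.length with hm
  set g := Nat.gcd l.length k.length with hg
  -- on [1, g] the divisibility test is implied by pvP
  have hQ : (List.range' 1 g).countP (fun n => (g % n == 0) && pvP l k n)
      = (List.range' 1 g).countP (pvP l k) := by
    apply List.countP_congr
    intro n hn
    have hn1 : 1 ≤ n := (List.mem_range'_1.mp hn).1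
    cases hp : pvP l k n with
    | false => simp
    | true =>
      simp only [Bool.and_true, beq_iff_eq, iff_true]
      exact Nat.mod_eq_zero_of_dvd (pvP_dvd_gcd hn1 hp)
  rw [hQ]
  -- both sides extend by zeros to [1, max m g]
  have hext : ∀ (t N : Nat), t ≤ N →
      (∀ j, t < j → j ≤ N → pvP l k j = false) →
      (List.range' 1 N).countP (pvP l k) = (List.range' 1 t).countP (pvP l k) := by
    intro t N htN hzero
    have hsplit : List.range' 1 N = List.range' 1 t ++ List.range' (1 + t) (N - t) := by
      have h := List.range'_append (s := 1) (m := t) (n := N - t) (step := 1)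
      rw [one_mul] at h
      calc List.range' 1 N = List.range' 1 (t + (N - t)) := by congr 1; omega
        _ = List.range' 1 t ++ List.range' (1 + t) (N - t) := h.symm
    rw [hsplit, List.countP_append]
    have h0 : (List.range' (1 + t) (N - t)).countP (pvP l k) = 0 := by
      apply List.countP_eq_zero.mpr
      intro j hj
      rw [List.mem_range'_1] at hj
      rw [hzero j (by omega) (by omega)]
      simp
    omega
  -- degenerate case: both strings empty
  by_cases h0 : l.length = 0 ∧ k.length = 0
  · have hm0 : m = 0 := by omega
    have hg0 : g = 0 := by rw [hg, Nat.gcd_eq_zero_iff]; omega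
    rw [hm0, hg0]
  · have hgpos : 0 < g := by
      rcases Nat.eq_zero_or_pos g with h | h
      · exact absurd (Nat.gcd_eq_zero_iff.mp (hg ▸ h)) h0
      · exact h
    have hfalse_gt_m : ∀ j, m < j → j ≤ max m g → pvP l k j = false := by
      intro j hmj hjN
      cases hpj : pvP l k j with
      | false => rfl
      | true =>
        exfalso
        rcases pvP_bounds (by omega) hpj with ⟨h1, h2⟩ | ⟨h1, h2⟩
        · omega
        · exact h0 ⟨by simp [h1], by simp [h2]⟩
    have hfalse_gt_g : ∀ j, g < j → j ≤ max m g → pvP l k j = false := by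
      intro j hgj hjN
      cases hpj : pvP l k j with
      | false => rfl
      | true =>
        exfalso
        have hdvd := pvP_dvd_gcd (by omega) hpj
        have := Nat.le_of_dvd hgpos hdvd
        omega
    rw [← hext m (max m g) (Nat.le_max_left _ _) hfalse_gt_m,
        ← hext g (max m g) (Nat.le_max_right _ _) hfalse_gt_g]

-- ===== VERDICT (by name: the statement is the Claim_ definition above) =====
theorem solution_spec : Claim_equal_solution := by
  intro a b _
  unfold Spec_solution solution solution_alt
  simp only [PySem.Str.len_eq]
  set l := a.toList with hl
  set k := b.toList with hk
  set g := Nat.gcd l.length k.length with hgdef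
  have hA : pvAgo l k (PySem.List.pyRange 1 (((min l.length k.length : Nat) : Int) + 1) 1) 0
      = ((List.range' 1 (min l.length k.length)).countP (pvP l k) : Int) := by
    have h := pvAgo_count l k (min l.length k.length) (min l.length k.length) 1 0 (by omega)
    simpa using h
  have hB : (PySem.List.pyRange 1 (((g : Nat) : Int) + 1) 1).foldl
        (fun count i =>
          if PySem.Int.mod (g : Int) i = 0
             ∧ PySem.List.slice l none (some i) = PySem.List.slice k none (some i)
             ∧ PySem.List.pyRepeat (PySem.List.slice l none (some i)) (PySem.Int.floordiv (l.length : Int) i) = l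
             ∧ PySem.List.pyRepeat (PySem.List.slice k none (some i)) (PySem.Int.floordiv (k.length : Int) i) = k
           then count + 1 else count) 0
      = ((List.range' 1 g).countP (fun j => (g % j == 0) && pvP l k j) : Int) := by
    have h := pvBgo_count l k g g 1 0 (by omega)
    simpa using h
  have hmin : (min ((l.length : Nat) : Int) ((k.length : Nat) : Int))
      = ((min l.length k.length : Nat) : Int) := by
    push_cast
    rfl
  rw [hmin, hA, pvGcdLoop_eq l.length k.length, ← hgdef, hB]
  exact_mod_cast pvCount_eq l k
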